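-- pv_equiv track=rewrite | github.com/Jainam672/growth_pilot_v2 | backend/routers/chat_routes.py | _clean_chat_output
-- ===== SOURCE A (Python) =====
-- def _clean_chat_output(text: str) -> str:
--     text = (text or "").replace("\r\n", "\n").strip()
--     lines = [line.rstrip() for line in text.split("\n")]
--     cleaned = []
--     previous_blank = False
--
--     for line in lines:
--         stripped = line.strip()
--         if not stripped:
--             if not previous_blank:
--                 cleaned.append("")
--             previous_blank = True
--             continue
--
--         if stripped.startswith("#"):
--             stripped = stripped.lstrip("#").strip()
--             stripped = f"**{stripped}**"
--
--         cleaned.append(stripped)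
--         previous_blank = False
--
--     return "\n".join(cleaned).strip()
-- ===== SOURCE B (Python) =====
-- def _clean_chat_output(text: str) -> str:
--     text = (text or "").replace("\r\n", "\n").strip()
--
--     def fmt(line: str) -> str:
--         s = line.strip()
--         if s.startswith("#"):
--             return "**" + s.lstrip("#").strip() + "**"
--         return s
--
--     # Split the text into paragraphs: maximal runs of non-blank lines.
--     paragraphs = []
--     current = []
--     for line in text.split("\n"):
--         s = fmt(line)
--         if s:
--             current.append(s)
--         else:
--             if current:
--                 paragraphs.append(current)
--             current = []
--     if current:
--         paragraphs.append(current)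
--
--     # A collapsed blank run is exactly the paragraph separator.
--     return "\n\n".join("\n".join(p) for p in paragraphs)
-- ===== Notes on version B (the rewrite author's own statement) =====
-- stated objective: alternative
-- what changed: Replaces A's single stateful emit-loop (previous_blank flag, blank markers in the output list, final strip) by a paragraph-splitting algorithm: lines are grouped into maximal runs of non-blank formatted lines (paragraphs), and the result is the paragraphs, each joined with a newline, joined with a blank-line separator; no blank entries and no final strip are ever produced.
import Mathlib
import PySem

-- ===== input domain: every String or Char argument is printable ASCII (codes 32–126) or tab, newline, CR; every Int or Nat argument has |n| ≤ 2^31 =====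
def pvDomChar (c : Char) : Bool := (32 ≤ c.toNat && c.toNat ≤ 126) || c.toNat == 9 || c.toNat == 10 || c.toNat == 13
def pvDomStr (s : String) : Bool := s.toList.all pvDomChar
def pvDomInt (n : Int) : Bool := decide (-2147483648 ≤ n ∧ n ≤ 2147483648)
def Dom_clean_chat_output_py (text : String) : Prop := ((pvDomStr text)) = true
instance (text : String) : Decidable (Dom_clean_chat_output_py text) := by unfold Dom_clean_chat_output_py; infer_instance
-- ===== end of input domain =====

-- B replaces A's stateful blank-flag loop by a paragraph-splitting algorithm: group the
-- formatted lines into maximal non-blank runs and join the groups with a blank-line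
-- separator; same return value (alternative decomposition, same cost).

-- ===== PORT A =====
-- loop body of A's for-loop, as a foldl step over the state (cleaned, previous_blank);
-- 'lstrip("#")' is ported by hand as dropWhile (· == '#'), exact
def pvStepA (st : List (List Char) × Bool) (line : List Char) : List (List Char) × Bool :=
  let stripped := PySem.Chars.strip line
  if stripped = [] then
    (if st.2 then st.1 else st.1 ++ [([] : List Char)], true)
  else
    let stripped2 := if PySem.Chars.startswith stripped ['#'] then
        '*' :: '*' :: (PySem.Chars.strip (stripped.dropWhile (fun c => c == '#')) ++ ['*', '*'])
      else stripped
    (st.1 ++ [stripped2], false)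

def clean_chat_output_py (text : String) : String :=
  let t := PySem.Chars.strip (PySem.Chars.replace text.toList ['\r', '\n'] ['\n'])
  let lines := (PySem.Chars.splitOn t ['\n']).map PySem.Chars.rstrip
  let r := lines.foldl pvStepA (([], false) : List (List Char) × Bool)
  String.ofList (PySem.Chars.strip (PySem.Chars.join ['\n'] r.1))

-- ===== PORT B =====
-- helper fmt of B; 'lstrip("#")' ported by hand as dropWhile (· == '#'), exact
def pvFmt (line : List Char) : List Char :=
  if PySem.Chars.startswith (PySem.Chars.strip line) ['#'] then
    '*' :: '*' :: (PySem.Chars.strip ((PySem.Chars.strip line).dropWhile (fun c => c == '#')) ++ ['*', '*'])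
  else PySem.Chars.strip line

-- loop body of B's paragraph-collecting for-loop over the state (paragraphs, current)
def pvStepB (st : List (List (List Char)) × List (List Char)) (line : List Char) :
    List (List (List Char)) × List (List Char) :=
  let s := pvFmt line
  if s ≠ [] then (st.1, st.2 ++ [s])
  else if st.2 ≠ [] then (st.1 ++ [st.2], []) else (st.1, [])

def clean_chat_output_py_alt (text : String) : String :=
  let t := PySem.Chars.strip (PySem.Chars.replace text.toList ['\r', '\n'] ['\n'])
  let r := (PySem.Chars.splitOn t ['\n']).foldl pvStepB
      (([], []) : List (List (List Char)) × List (List Char))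
  let paras := if r.2 ≠ [] then r.1 ++ [r.2] else r.1
  String.ofList (PySem.Chars.join ['\n', '\n'] (paras.map (PySem.Chars.join ['\n'])))

-- ===== PRECONDITION & SPEC =====
def Spec_clean_chat_output_py (text : String) (out : String) : Prop := out = clean_chat_output_py_alt text
instance (text : String) (out : String) : Decidable (Spec_clean_chat_output_py text out) := by unfold Spec_clean_chat_output_py; infer_instance

-- ===== CLAIM (what is proved, stated in full; the proofs are below) =====
def Claim_equal_clean_chat_output_py : Prop := ∀ (text : String), Dom_clean_chat_output_py text → Spec_clean_chat_output_py text (clean_chat_output_py text)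

-- ===== LEMMAS AND PROOFS =====

-- canonical paragraph grouping: pvG parts = the '\n'-joined maximal non-blank runs
-- how a non-blank line z extends the grouping r of the remaining lines zs
def pvGcons (z : List Char) (zs : List (List Char)) (r : List (List Char)) : List (List Char) :=
  match zs, r with
  | w :: _, g :: gs => if w = [] then z :: g :: gs else (z ++ '\n' :: g) :: gs
  | _, _ => [z]

def pvG : List (List Char) → List (List Char)
  | [] => []
  | z :: zs => if z = [] then pvG zs else pvGcons z zs (pvG zs)

theorem pvG_cons_eq (z : List Char) (zs : List (List Char)) :
    pvG (z :: zs) = if z = [] then pvG zs else pvGcons z zs (pvG zs) := rfl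

-- A's blank-flag collapse (what A's loop computes on the formatted lines)
def pvCb : Bool → List (List Char) → List (List Char)
  | _, [] => []
  | b, z :: zs =>
    if z = [] then (if b then pvCb true zs else [] :: pvCb true zs)
    else z :: pvCb false zs

-- ---------- generic strip lemmas ----------

theorem pv_dropWhile_idem {α : Type} (p : α → Bool) (l : List α) :
    List.dropWhile p (List.dropWhile p l) = List.dropWhile p l := by
  induction l with
  | nil => simp
  | cons c t ih =>
    by_cases h : p c = true
    · simpa [List.dropWhile, h] using ih
    · simp [List.dropWhile, h]

theorem pv_rstrip_cons (c : Char) (t : List Char) :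
    PySem.Chars.rstrip (c :: t) =
      if PySem.Chars.rstrip t = [] then
        (if PySem.Chars.isspace c then [] else [c])
      else c :: PySem.Chars.rstrip t := by
  simp only [PySem.Chars.rstrip, List.reverse_cons, List.dropWhile_append]
  by_cases h : List.dropWhile PySem.Chars.isspace t.reverse = []
  · by_cases hc : PySem.Chars.isspace c <;> simp [h, List.dropWhile, hc]
  · simp [h, List.isEmpty_iff, List.reverse_eq_nil_iff]

theorem pv_lstrip_rstrip_comm (l : List Char) :
    PySem.Chars.lstrip (PySem.Chars.rstrip l) = PySem.Chars.rstrip (PySem.Chars.lstrip l) := by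
  induction l with
  | nil => simp [PySem.Chars.lstrip, PySem.Chars.rstrip]
  | cons c t ih =>
    by_cases hc : PySem.Chars.isspace c = true
    · rw [pv_rstrip_cons]
      by_cases h : PySem.Chars.rstrip t = []
      · have h2 : PySem.Chars.rstrip (PySem.Chars.lstrip t) = [] := by
          rw [← ih, h]; rfl
        have h2' : PySem.Chars.rstrip (List.dropWhile PySem.Chars.isspace t) = [] := by
          simpa [PySem.Chars.lstrip] using h2
        simp [h, hc, PySem.Chars.lstrip, List.dropWhile, h2']
      · have ih' : List.dropWhile PySem.Chars.isspace (PySem.Chars.rstrip t)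
            = PySem.Chars.rstrip (List.dropWhile PySem.Chars.isspace t) := by
          simpa [PySem.Chars.lstrip] using ih
        simp [h, hc, PySem.Chars.lstrip, List.dropWhile, ih']
    · rw [pv_rstrip_cons]
      by_cases h : PySem.Chars.rstrip t = [] <;>
        simp [h, hc, PySem.Chars.lstrip, List.dropWhile, pv_rstrip_cons]

theorem pv_rstrip_idem (l : List Char) :
    PySem.Chars.rstrip (PySem.Chars.rstrip l) = PySem.Chars.rstrip l := by
  simp [PySem.Chars.rstrip, pv_dropWhile_idem]

theorem pv_lstrip_idem (l : List Char) :
    PySem.Chars.lstrip (PySem.Chars.lstrip l) = PySem.Chars.lstrip l := by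
  simp [PySem.Chars.lstrip, pv_dropWhile_idem]

theorem pv_strip_rstrip (l : List Char) :
    PySem.Chars.strip (PySem.Chars.rstrip l) = PySem.Chars.strip l := by
  simp only [PySem.Chars.strip, ← pv_lstrip_rstrip_comm, pv_rstrip_idem]

theorem pv_strip_idem (l : List Char) :
    PySem.Chars.strip (PySem.Chars.strip l) = PySem.Chars.strip l := by
  simp only [PySem.Chars.strip, ← pv_lstrip_rstrip_comm, pv_rstrip_idem,
    pv_lstrip_idem, pv_lstrip_rstrip_comm]

theorem pv_lstrip_of_strip (l : List Char) (h : PySem.Chars.strip l = l) :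
    PySem.Chars.lstrip l = l := by
  conv_lhs => rw [← h]
  simp only [PySem.Chars.strip, ← pv_lstrip_rstrip_comm, pv_lstrip_idem]
  rw [pv_lstrip_rstrip_comm]; exact h

theorem pv_rstrip_of_strip (l : List Char) (h : PySem.Chars.strip l = l) :
    PySem.Chars.rstrip l = l := by
  conv_lhs => rw [← h]
  simp only [PySem.Chars.strip, pv_rstrip_idem]; exact h

theorem pv_head_not_space (c : Char) (t : List Char)
    (h : PySem.Chars.lstrip (c :: t) = c :: t) : PySem.Chars.isspace c = false := by
  by_cases hc : PySem.Chars.isspace c = true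
  · exfalso
    simp only [PySem.Chars.lstrip, List.dropWhile, hc] at h
    have := congrArg List.length h
    have hle := List.length_dropWhile_le (p := PySem.Chars.isspace) (l := t)
    simp at this; omega
  · simpa using hc

theorem pv_lstrip_append_of_strip (p r : List Char) (hp : PySem.Chars.strip p = p)
    (hne : p ≠ []) : PySem.Chars.lstrip (p ++ r) = p ++ r := by
  obtain ⟨c, t, rfl⟩ := List.exists_cons_of_ne_nil hne
  have hc := pv_head_not_space c t (pv_lstrip_of_strip _ hp)
  simp [PySem.Chars.lstrip, List.dropWhile, hc]

theorem pv_rstrip_append (p r : List Char) :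
    PySem.Chars.rstrip (p ++ r) =
      if PySem.Chars.rstrip r = [] then PySem.Chars.rstrip p else p ++ PySem.Chars.rstrip r := by
  simp only [PySem.Chars.rstrip, List.reverse_append, List.dropWhile_append]
  by_cases h : List.dropWhile PySem.Chars.isspace r.reverse = []
  · simp [h]
  · simp [h, List.isEmpty_iff, List.reverse_eq_nil_iff]

-- strip of a stripped nonempty prefix followed by a tail
theorem pv_strip_append_of_strip (p r : List Char) (hp : PySem.Chars.strip p = p)
    (hne : p ≠ []) :
    PySem.Chars.strip (p ++ r) =
      if PySem.Chars.rstrip r = [] then p else p ++ PySem.Chars.rstrip r := by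
  simp only [PySem.Chars.strip, pv_lstrip_append_of_strip p r hp hne, pv_rstrip_append,
    pv_rstrip_of_strip p hp]

theorem pv_strip_cons_newline (s : List Char) :
    PySem.Chars.strip ('\n' :: s) = PySem.Chars.strip s := by
  have : PySem.Chars.isspace '\n' = true := by decide
  simp [PySem.Chars.strip, PySem.Chars.lstrip, List.dropWhile, this]

theorem pv_rstrip_eq_strip_of_lstrip (s : List Char) (h : PySem.Chars.lstrip s = s) :
    PySem.Chars.rstrip s = PySem.Chars.strip s := by
  simp only [PySem.Chars.strip, h]

-- ---------- join lemmas ----------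

theorem pv_join_cons (sep : List Char) (x : List Char) (xs : List (List Char)) :
    PySem.Chars.join sep (x :: xs) =
      x ++ (if xs = [] then [] else sep ++ PySem.Chars.join sep xs) := by
  cases xs with
  | nil => simp [PySem.Chars.join_singleton]
  | cons y t => simp [PySem.Chars.join_cons_cons]

theorem pv_join_append_singleton (cur : List (List Char)) (z : List Char) (h : cur ≠ []) :
    PySem.Chars.join ['\n'] (cur ++ [z]) = PySem.Chars.join ['\n'] cur ++ '\n' :: z := by
  induction cur with
  | nil => exact absurd rfl h
  | cons a t ih =>
    cases t with
    | nil => simp [PySem.Chars.join_cons_cons, PySem.Chars.join_singleton]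
    | cons b u =>
      have hrec := ih (by simp)
      simp only [List.cons_append, PySem.Chars.join_cons_cons] at hrec ⊢
      simp [hrec]

-- ---------- pvFmt lemmas ----------

theorem pvFmt_rstrip (l : List Char) : pvFmt (PySem.Chars.rstrip l) = pvFmt l := by
  simp [pvFmt, pv_strip_rstrip]

theorem pvFmt_eq_nil_iff (l : List Char) : pvFmt l = [] ↔ PySem.Chars.strip l = [] := by
  unfold pvFmt
  by_cases h : PySem.Chars.startswith (PySem.Chars.strip l) ['#'] = true
  · constructor
    · intro hh; simp [h] at hh
    · intro hh; rw [hh] at h; simp [PySem.Chars.startswith] at h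
  · simp [h]

theorem pvFmt_stripped (l : List Char) : PySem.Chars.strip (pvFmt l) = pvFmt l := by
  unfold pvFmt
  by_cases h : PySem.Chars.startswith (PySem.Chars.strip l) ['#'] = true
  · rw [if_pos h]
    have hsp : PySem.Chars.isspace '*' = false := by decide
    have e : ('*' :: '*' :: (PySem.Chars.strip (List.dropWhile (fun c => c == '#') (PySem.Chars.strip l)) ++ ['*', '*']))
        = ('*' :: '*' :: (PySem.Chars.strip (List.dropWhile (fun c => c == '#') (PySem.Chars.strip l)) ++ ['*'])) ++ ['*'] := by
      simp
    have hls : PySem.Chars.lstrip ('*' :: '*' :: (PySem.Chars.strip (List.dropWhile (fun c => c == '#') (PySem.Chars.strip l)) ++ ['*', '*']))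
        = '*' :: '*' :: (PySem.Chars.strip (List.dropWhile (fun c => c == '#') (PySem.Chars.strip l)) ++ ['*', '*']) := by
      simp [PySem.Chars.lstrip, List.dropWhile, hsp]
    have hrs1 : PySem.Chars.rstrip (['*'] : List Char) = ['*'] := by decide
    have hrs : PySem.Chars.rstrip ('*' :: '*' :: (PySem.Chars.strip (List.dropWhile (fun c => c == '#') (PySem.Chars.strip l)) ++ ['*', '*']))
        = '*' :: '*' :: (PySem.Chars.strip (List.dropWhile (fun c => c == '#') (PySem.Chars.strip l)) ++ ['*', '*']) := by
      rw [e, pv_rstrip_append, hrs1]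
      simp
    rw [show (PySem.Chars.strip ('*' :: '*' :: (PySem.Chars.strip (List.dropWhile (fun c => c == '#') (PySem.Chars.strip l)) ++ ['*', '*'])))
        = PySem.Chars.rstrip (PySem.Chars.lstrip ('*' :: '*' :: (PySem.Chars.strip (List.dropWhile (fun c => c == '#') (PySem.Chars.strip l)) ++ ['*', '*']))) from rfl,
      hls, hrs]
  · rw [if_neg h]
    exact pv_strip_idem l

-- A's foldl with the previous_blank flag computes pvCb of the formatted lines
theorem pv_loopA_eq (ls : List (List Char)) : ∀ (acc : List (List Char)) (b : Bool),
    (ls.foldl pvStepA (acc, b)).1 = acc ++ pvCb b (ls.map pvFmt) := by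
  induction ls with
  | nil => intro acc b; simp [pvCb]
  | cons line rest ih =>
    intro acc b
    by_cases h : PySem.Chars.strip line = []
    · have hz : pvFmt line = [] := (pvFmt_eq_nil_iff line).mpr h
      by_cases hb : b <;> simp [List.foldl_cons, pvStepA, h, hz, hb, pvCb, ih]
    · have hz : pvFmt line ≠ [] := fun hc => h ((pvFmt_eq_nil_iff line).mp hc)
      have hval : (if PySem.Chars.startswith (PySem.Chars.strip line) ['#'] = true then
            '*' :: '*' :: (PySem.Chars.strip (List.dropWhile (fun c => c == '#') (PySem.Chars.strip line)) ++ ['*', '*'])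
          else PySem.Chars.strip line) = pvFmt line := by
        simp [pvFmt]
      simp [List.foldl_cons, pvStepA, h, hz, pvCb, ih, hval]

-- specialized join-cons forms with the separator expanded
theorem pv_join1_cons (x : List Char) (xs : List (List Char)) :
    PySem.Chars.join ['\n'] (x :: xs) =
      x ++ (if xs = [] then [] else '\n' :: PySem.Chars.join ['\n'] xs) := by
  rw [pv_join_cons]; simp

theorem pv_join2_cons (x : List Char) (xs : List (List Char)) :
    PySem.Chars.join ['\n', '\n'] (x :: xs) =
      x ++ (if xs = [] then [] else '\n' :: '\n' :: PySem.Chars.join ['\n', '\n'] xs) := by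
  rw [pv_join_cons]; simp

-- ---------- pvCb lemmas ----------

theorem pvCb_true_eq_nil_iff (t : List (List Char)) :
    pvCb true t = [] ↔ ∀ p ∈ t, p = [] := by
  induction t with
  | nil => simp [pvCb]
  | cons z zs ih =>
    by_cases hz : z = []
    · simp [pvCb, hz, ih]
    · simp [pvCb, hz]

theorem pvCb_false_cons_ne (z : List Char) (zs : List (List Char)) :
    pvCb false (z :: zs) ≠ [] := by
  by_cases hz : z = [] <;> simp [pvCb, hz]

theorem pvCb_true_head (t : List (List Char)) (q : List Char) (qs : List (List Char))
    (h : pvCb true t = q :: qs) : q ≠ [] ∧ q ∈ t := by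
  induction t with
  | nil => simp [pvCb] at h
  | cons z zs ih =>
    by_cases hz : z = []
    · simp only [pvCb, hz, if_true, if_pos rfl] at h
      rcases ih (by simpa [pvCb] using h) with ⟨h1, h2⟩
      exact ⟨h1, by simp [h2]⟩
    · simp only [pvCb, hz, if_false, if_neg hz] at h
      rcases h with ⟨rfl, _⟩
      exact ⟨hz, by simp⟩


theorem pvCb_blank_false (zs : List (List Char)) :
    pvCb false (([] : List Char) :: zs) = [] :: pvCb true zs := by simp [pvCb]

theorem pvCb_blank_true (zs : List (List Char)) :
    pvCb true (([] : List Char) :: zs) = pvCb true zs := by simp [pvCb]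

theorem pvCb_cons_nonblank (z : List Char) (zs : List (List Char)) (b : Bool) (hz : z ≠ []) :
    pvCb b (z :: zs) = z :: pvCb false zs := by simp [pvCb, hz]

-- ---------- pvG lemmas ----------

theorem pv_pvG_cons_blank (zs : List (List Char)) : pvG ([] :: zs) = pvG zs := by
  simp [pvG]

theorem pv_pvG_cons_cons_blank (z : List Char) (zs' : List (List Char)) (hz : z ≠ []) :
    pvG (z :: [] :: zs') = z :: pvG zs' := by
  rw [pvG_cons_eq, if_neg hz, pv_pvG_cons_blank]
  cases h : pvG zs' with
  | nil => simp [pvGcons]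
  | cons g gs => simp [pvGcons]

theorem pv_pvG_cons_cons (z w : List Char) (zs' : List (List Char)) (hz : z ≠ [])
    (hw : w ≠ []) (g : List Char) (gs : List (List Char)) (hgg : pvG (w :: zs') = g :: gs) :
    pvG (z :: w :: zs') = (z ++ '\n' :: g) :: gs := by
  rw [pvG_cons_eq, if_neg hz, hgg]
  simp [pvGcons, hw]


theorem pvG_eq_nil_iff (t : List (List Char)) : pvG t = [] ↔ ∀ p ∈ t, p = [] := by
  induction t with
  | nil => simp [pvG]
  | cons z zs ih =>
    by_cases hz : z = []
    · simp [pvG, hz, ih]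
    · constructor
      · intro h
        exfalso
        rw [pvG_cons_eq, if_neg hz] at h
        cases zs with
        | nil => simp [pvGcons] at h
        | cons w t' =>
          cases hgz : pvG (w :: t') with
          | nil => rw [hgz] at h; simp [pvGcons] at h
          | cons g gs =>
            rw [hgz] at h
            by_cases hw : w = [] <;> simp [pvGcons, hw] at h
      · intro h; exact absurd (h z (by simp)) hz

theorem pvG_cons_ne (z : List Char) (zs : List (List Char)) (hz : z ≠ []) :
    pvG (z :: zs) ≠ [] := by
  rw [pvG_cons_eq, if_neg hz]
  cases zs with
  | nil => simp [pvGcons]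
  | cons w t' =>
    cases hgz : pvG (w :: t') with
    | nil => simp [pvGcons]
    | cons g gs => by_cases hw : w = [] <;> simp [pvGcons, hw]

theorem pvG_elems_ne (t : List (List Char)) : ∀ g ∈ pvG t, g ≠ [] := by
  induction t with
  | nil => simp [pvG]
  | cons z zs ih =>
    by_cases hz : z = []
    · simpa [pvG, hz] using ih
    · intro g hg
      rw [pvG_cons_eq, if_neg hz] at hg
      cases zs with
      | nil =>
        simp only [pvGcons, List.mem_singleton] at hg
        subst hg; exact hz
      | cons w t' =>
        cases hgz : pvG (w :: t') with
        | nil =>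
          rw [hgz] at hg
          simp only [pvGcons, List.mem_singleton] at hg
          subst hg; exact hz
        | cons g' gs =>
          rw [hgz] at hg
          simp only [pvGcons] at hg
          by_cases hw : w = []
          · rw [if_pos hw] at hg
            simp only [List.mem_cons] at hg
            rcases hg with rfl | hg
            · exact hz
            · exact ih g (by rw [hgz]; simpa using hg)
          · rw [if_neg hw] at hg
            simp only [List.mem_cons] at hg
            rcases hg with rfl | hg
            · simp [hz]
            · exact ih g (by rw [hgz]; simp [hg])

theorem pv_J2_ne_nil (groups : List (List Char)) (h : groups ≠ [])
    (hh : ∀ g ∈ groups, g ≠ []) : PySem.Chars.join ['\n', '\n'] groups ≠ [] := by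
  obtain ⟨g, gs, rfl⟩ := List.exists_cons_of_ne_nil h
  rw [pv_join2_cons]
  have hg := hh g (by simp)
  simp [hg]

-- the '\n'-join of pvCb true starts with a non-space char (or is empty)
theorem pv_lstrip_join_pvCb_true (t : List (List Char))
    (wf : ∀ p ∈ t, PySem.Chars.strip p = p) :
    PySem.Chars.lstrip (PySem.Chars.join ['\n'] (pvCb true t))
      = PySem.Chars.join ['\n'] (pvCb true t) := by
  cases hc : pvCb true t with
  | nil => simp [PySem.Chars.join, List.intercalate, PySem.Chars.lstrip]
  | cons q qs =>
    rcases pvCb_true_head t q qs hc with ⟨hq, hmem⟩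
    rw [pv_join1_cons]
    rcases List.exists_cons_of_ne_nil hq with ⟨c, u, rfl⟩
    have hstrip := wf _ hmem
    have hc' := pv_head_not_space c u (pv_lstrip_of_strip _ hstrip)
    simp [PySem.Chars.lstrip, List.dropWhile, hc']

theorem pv_strip_join_false_eq_true (zs : List (List Char)) :
    PySem.Chars.strip (PySem.Chars.join ['\n'] (pvCb false zs))
      = PySem.Chars.strip (PySem.Chars.join ['\n'] (pvCb true zs)) := by
  cases zs with
  | nil => rfl
  | cons z t =>
    by_cases hz : z = []
    · subst hz
      rw [pvCb_blank_false, pvCb_blank_true, pv_join1_cons]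
      cases hc : pvCb true t with
      | nil => simp [PySem.Chars.join_nil]
      | cons q qs =>
        rw [if_neg (by simp), List.nil_append, pv_strip_cons_newline]
    · simp [pvCb, hz]

-- ===== M1: A's collapsed join, stripped, equals the paragraph join =====

theorem pv_M1_aux : ∀ (n : Nat) (parts : List (List Char)), parts.length ≤ n →
    (∀ p ∈ parts, PySem.Chars.strip p = p) →
    PySem.Chars.strip (PySem.Chars.join ['\n'] (pvCb false parts))
      = PySem.Chars.join ['\n', '\n'] (pvG parts) := by
  intro n
  induction n with
  | zero =>
    intro parts hlen _
    have : parts = [] := List.length_eq_zero_iff.mp (Nat.le_zero.mp hlen)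
    subst this
    rfl
  | succ n ih =>
    intro parts hlen wf
    cases parts with
    | nil => rfl
    | cons z zs =>
      have hlzs : zs.length ≤ n := by simpa using hlen
      have wfzs : ∀ p ∈ zs, PySem.Chars.strip p = p := fun p hp => wf p (by simp [hp])
      by_cases hz : z = []
      · -- leading blank line
        subst hz
        rw [pvCb_blank_false, pv_pvG_cons_blank, pv_join1_cons]
        cases hc : pvCb true zs with
        | nil =>
          have hall : ∀ p ∈ zs, p = [] := (pvCb_true_eq_nil_iff zs).mp hc
          rw [(pvG_eq_nil_iff zs).mpr hall]
          simp [PySem.Chars.join_nil, PySem.Chars.strip, PySem.Chars.lstrip, PySem.Chars.rstrip]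
        | cons q qs =>
          rw [if_neg (by simp), List.nil_append, pv_strip_cons_newline, ← hc,
            ← pv_strip_join_false_eq_true zs]
          exact ih zs hlzs wfzs
      · -- z non-blank
        have hstripz := wf z (by simp)
        rw [pvCb_cons_nonblank z zs false hz]
        cases zs with
        | nil =>
          rw [show pvCb false ([] : List (List Char)) = [] from rfl, PySem.Chars.join_singleton,
            hstripz]
          rw [pvG_cons_eq, if_neg hz]
          simp [pvGcons, PySem.Chars.join_singleton]
        | cons w zs' =>
          rw [pv_join1_cons, if_neg (pvCb_false_cons_ne w zs'),
            pv_strip_append_of_strip z _ hstripz hz]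
          have hlzs' : zs'.length ≤ n := by simp at hlen; omega
          have wfzs' : ∀ p ∈ zs', PySem.Chars.strip p = p := fun p hp => wfzs p (by simp [hp])
          by_cases hw : w = []
          · -- blank separator after z
            subst hw
            rw [pvCb_blank_false, pv_join1_cons, List.nil_append]
            cases hc : pvCb true zs' with
            | nil =>
              rw [if_pos rfl]
              rw [show PySem.Chars.rstrip (['\n'] : List Char) = [] from by decide, if_pos rfl]
              have hall : ∀ p ∈ zs', p = [] := (pvCb_true_eq_nil_iff zs').mp hc
              rw [pv_pvG_cons_cons_blank z zs' hz, (pvG_eq_nil_iff zs').mpr hall,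
                PySem.Chars.join_singleton]
            | cons q qs =>
              rcases pvCb_true_head zs' q qs hc with ⟨hq, hqmem⟩
              have hSl : PySem.Chars.lstrip (PySem.Chars.join ['\n'] (pvCb true zs'))
                  = PySem.Chars.join ['\n'] (pvCb true zs') := pv_lstrip_join_pvCb_true zs' wfzs'
              have hSstrip : PySem.Chars.rstrip (PySem.Chars.join ['\n'] (pvCb true zs'))
                  = PySem.Chars.join ['\n', '\n'] (pvG zs') := by
                rw [pv_rstrip_eq_strip_of_lstrip _ hSl, ← pv_strip_join_false_eq_true zs']
                exact ih zs' hlzs' wfzs'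
              have hgne : pvG zs' ≠ [] := by
                rw [Ne, pvG_eq_nil_iff]
                intro hall
                exact hq (hall q hqmem)
              have hSne : PySem.Chars.join ['\n', '\n'] (pvG zs') ≠ [] :=
                pv_J2_ne_nil _ hgne (pvG_elems_ne zs')
              rw [if_neg (by simp : ¬(q :: qs = [])), ← hc]
              rw [pv_rstrip_cons, pv_rstrip_cons, hSstrip, if_neg hSne,
                if_neg (by simp : ¬('\n' :: PySem.Chars.join ['\n', '\n'] (pvG zs') = [])),
                if_neg (by simp : ¬('\n' :: '\n' :: PySem.Chars.join ['\n', '\n'] (pvG zs') = []))]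
              rw [pv_pvG_cons_cons_blank z zs' hz, pv_join2_cons, if_neg hgne]
          · -- w non-blank: z and the next line belong to the same paragraph
            have hR : PySem.Chars.lstrip (PySem.Chars.join ['\n'] (pvCb false (w :: zs')))
                = PySem.Chars.join ['\n'] (pvCb false (w :: zs')) := by
              rw [pvCb_cons_nonblank w zs' false hw, pv_join1_cons]
              exact pv_lstrip_append_of_strip w _ (wfzs w (by simp)) hw
            have hRstrip : PySem.Chars.rstrip (PySem.Chars.join ['\n'] (pvCb false (w :: zs')))
                = PySem.Chars.join ['\n', '\n'] (pvG (w :: zs')) := by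
              rw [pv_rstrip_eq_strip_of_lstrip _ hR]
              exact ih (w :: zs') hlzs wfzs
            have hgne : pvG (w :: zs') ≠ [] := pvG_cons_ne w zs' hw
            have hJne : PySem.Chars.join ['\n', '\n'] (pvG (w :: zs')) ≠ [] :=
              pv_J2_ne_nil _ hgne (pvG_elems_ne _)
            rw [pv_rstrip_cons, hRstrip, if_neg hJne,
              if_neg (by simp : ¬('\n' :: PySem.Chars.join ['\n', '\n'] (pvG (w :: zs')) = []))]
            obtain ⟨g, gs, hgg⟩ := List.exists_cons_of_ne_nil hgne
            rw [pv_pvG_cons_cons z w zs' hz hw g gs hgg, pv_join2_cons, hgg, pv_join2_cons]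
            cases gs <;> simp

-- ===== M2: B's fold computes the paragraph groups =====

-- what remains of the grouping when a partial paragraph 'cur' is already open
def pvGpre (cur : List (List Char)) (parts : List (List Char)) : List (List Char) :=
  if cur = [] then pvG parts
  else match parts with
    | [] => [PySem.Chars.join ['\n'] cur]
    | z :: zs =>
      if z = [] then PySem.Chars.join ['\n'] cur :: pvG zs
      else match pvG (z :: zs) with
        | g :: gs => (PySem.Chars.join ['\n'] cur ++ '\n' :: g) :: gs
        | [] => [PySem.Chars.join ['\n'] cur]   -- unreachable: pvG (z::zs) ≠ [] for z ≠ []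

theorem pvGpre_nil_cur (parts : List (List Char)) : pvGpre [] parts = pvG parts := by
  simp [pvGpre]

theorem pvGpre_nil (cur : List (List Char)) (hc : cur ≠ []) :
    pvGpre cur [] = [PySem.Chars.join ['\n'] cur] := by
  unfold pvGpre
  rw [if_neg hc]

theorem pvGpre_blank (cur : List (List Char)) (zs : List (List Char)) (hc : cur ≠ []) :
    pvGpre cur ([] :: zs) = PySem.Chars.join ['\n'] cur :: pvG zs := by
  unfold pvGpre
  rw [if_neg hc]
  dsimp only
  rw [if_pos rfl]

theorem pvGpre_cons (cur : List (List Char)) (z : List Char) (zs : List (List Char))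
    (hc : cur ≠ []) (hz : z ≠ []) (g : List Char) (gs : List (List Char))
    (hgg : pvG (z :: zs) = g :: gs) :
    pvGpre cur (z :: zs) = (PySem.Chars.join ['\n'] cur ++ '\n' :: g) :: gs := by
  unfold pvGpre
  rw [if_neg hc]
  dsimp only
  rw [if_neg hz, hgg]

theorem pv_pvGpre_snoc (cur : List (List Char)) (s : List Char) (ps : List (List Char))
    (hs : s ≠ []) : pvGpre (cur ++ [s]) ps = pvGpre cur (s :: ps) := by
  by_cases hc : cur = []
  · subst hc
    rw [List.nil_append, pvGpre_nil_cur]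
    cases ps with
    | nil =>
      rw [pvGpre_nil [s] (by simp), PySem.Chars.join_singleton, pvG_cons_eq, if_neg hs]
      simp [pvGcons]
    | cons z zs =>
      by_cases hz : z = []
      · subst hz
        rw [pvGpre_blank [s] zs (by simp), PySem.Chars.join_singleton,
          pv_pvG_cons_cons_blank s zs hs]
      · obtain ⟨g, gs, hgg⟩ := List.exists_cons_of_ne_nil (pvG_cons_ne z zs hz)
        rw [pvGpre_cons [s] z zs (by simp) hz g gs hgg, PySem.Chars.join_singleton,
          pv_pvG_cons_cons s z zs hs hz g gs hgg]
  · have hc' : cur ++ [s] ≠ [] := by simp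
    have hj := pv_join_append_singleton cur s hc
    cases ps with
    | nil =>
      rw [pvGpre_nil _ hc', hj,
        pvGpre_cons cur s [] hc hs s []
          (by rw [pvG_cons_eq, if_neg hs]; simp [pvGcons])]
    | cons z zs =>
      by_cases hz : z = []
      · subst hz
        rw [pvGpre_blank _ zs hc', hj,
          pvGpre_cons cur s ([] :: zs) hc hs s (pvG zs) (pv_pvG_cons_cons_blank s zs hs)]
      · obtain ⟨g, gs, hgg⟩ := List.exists_cons_of_ne_nil (pvG_cons_ne z zs hz)
        rw [pvGpre_cons _ z zs hc' hz g gs hgg, hj,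
          pvGpre_cons cur s (z :: zs) hc hs (s ++ '\n' :: g) gs
            (pv_pvG_cons_cons s z zs hs hz g gs hgg)]
        simp

theorem pv_M2 (lines : List (List Char)) :
    ∀ (paras : List (List (List Char))) (cur : List (List Char)),
    (let r := lines.foldl pvStepB (paras, cur)
     ((if r.2 ≠ [] then r.1 ++ [r.2] else r.1).map (PySem.Chars.join ['\n'])))
      = paras.map (PySem.Chars.join ['\n']) ++ pvGpre cur (lines.map pvFmt) := by
  induction lines with
  | nil =>
    intro paras cur
    by_cases hc : cur = []
    · subst hc
      simp [pvGpre_nil_cur, pvG]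
    · rw [List.map_nil, pvGpre_nil cur hc]
      simp [hc]
  | cons line rest ih =>
    intro paras cur
    simp only [List.foldl_cons, List.map_cons]
    by_cases hs : pvFmt line = []
    · rw [show pvStepB (paras, cur) line
          = (if cur ≠ [] then paras ++ [cur] else paras, []) from by
        by_cases hc2 : cur = [] <;> simp [pvStepB, hs, hc2]]
      by_cases hc : cur = []
      · subst hc
        rw [show (if ([] : List (List Char)) ≠ [] then paras ++ [([] : List (List Char))]
            else paras) = paras from by simp]
        rw [ih paras [], pvGpre_nil_cur, hs, pvGpre_nil_cur, pv_pvG_cons_blank]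
      · rw [if_pos hc, ih, pvGpre_nil_cur, hs, pvGpre_blank cur _ hc]
        simp
    · rw [show pvStepB (paras, cur) line = (paras, cur ++ [pvFmt line]) from by
        simp [pvStepB, hs]]
      rw [ih paras (cur ++ [pvFmt line]), pv_pvGpre_snoc cur (pvFmt line) (rest.map pvFmt) hs]

-- ===== VERDICT (by name: the statement is the Claim_ definition above) =====
theorem clean_chat_output_py_spec : Claim_equal_clean_chat_output_py := by
  intro text _
  unfold Spec_clean_chat_output_py clean_chat_output_py clean_chat_output_py_alt
  dsimp only
  have hA := pv_loopA_eq
      ((PySem.Chars.splitOn (PySem.Chars.strip (PySem.Chars.replace text.toList ['\r', '\n'] ['\n'])) ['\n']).map PySem.Chars.rstrip) [] false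
  have hB := pv_M2
      (PySem.Chars.splitOn (PySem.Chars.strip (PySem.Chars.replace text.toList ['\r', '\n'] ['\n'])) ['\n']) [] []
  rw [hA]
  simp only [List.map_nil, List.nil_append] at hB
  rw [hB]
  have hcomp : (pvFmt ∘ PySem.Chars.rstrip) = pvFmt := funext (fun l => pvFmt_rstrip l)
  simp only [List.map_map, hcomp, List.nil_append, pvGpre_nil_cur]
  exact congrArg String.ofList (pv_M1_aux _ _ le_rfl
    (by intro p hp; simp only [List.mem_map] at hp; obtain ⟨l, _, rfl⟩ := hp; exact pvFmt_stripped l))
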